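-- pv_equiv track=rewrite | github.com/Himalaw/flexible_jobshop | CODE/main.py | calculate_standby_times
-- ===== SOURCE A (Python) =====
-- def calculate_Cmax(results):
--     Cmax = 0
--     last_machine = -1
--
--     for i, machine_results in enumerate(results):
--         if machine_results:
--             end_time = machine_results[-1][2] + machine_results[-1][1]
--             if end_time > Cmax:
--                 Cmax = end_time
--                 last_machine = i + 1
--
--     return Cmax, last_machine
--
-- def calculate_standby_times(results):
--     Cmax, last_machine = calculate_Cmax(results)
--     total_wait_times = [0] * len(results)
--
--     for i, machine_results in enumerate(results):
--         if machine_results: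
--             total_wait_times[i] = machine_results[0][2]
--             for j in range(len(machine_results) - 1):
--                 total_wait_times[i] += machine_results[j + 1][2] - (machine_results[j][2] + machine_results[j][1])
--             total_wait_times[i] += Cmax - (machine_results[-1][2] + machine_results[-1][1])
--         else:
--             total_wait_times[i] = Cmax
--
--     return total_wait_times
-- ===== SOURCE B (Python) =====
-- def calculate_standby_times(results):
--     Cmax = max([0] + [m[-1][2] + m[-1][1] for m in results if m])
--     return [Cmax - sum(op[1] for op in m) for m in results]
-- ===== Notes on version B (the rewrite author's own statement) =====
-- stated objective: simpler
-- what changed: The telescoping per-machine gap loop collapses to the closed form Cmax minus the machine's total operation duration, removing the inner pairwise loop and the empty/non-empty branch.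
import Mathlib
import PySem

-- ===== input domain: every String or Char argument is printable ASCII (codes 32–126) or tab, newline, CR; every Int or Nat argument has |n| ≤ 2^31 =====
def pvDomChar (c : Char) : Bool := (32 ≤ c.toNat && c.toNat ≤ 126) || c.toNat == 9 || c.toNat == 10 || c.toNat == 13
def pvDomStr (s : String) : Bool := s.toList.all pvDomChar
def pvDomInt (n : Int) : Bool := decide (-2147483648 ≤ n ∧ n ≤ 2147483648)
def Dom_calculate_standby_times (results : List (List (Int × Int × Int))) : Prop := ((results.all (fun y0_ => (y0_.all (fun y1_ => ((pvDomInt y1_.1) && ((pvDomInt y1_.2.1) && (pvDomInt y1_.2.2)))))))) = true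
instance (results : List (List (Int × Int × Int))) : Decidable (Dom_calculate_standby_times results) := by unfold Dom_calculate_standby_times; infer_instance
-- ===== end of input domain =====

-- B replaces A's inner telescoping gap loop (and the empty/non-empty branch) by the closed form
-- Cmax minus the machine's total operation duration; objective: simpler.

-- ===== PORT A =====
-- the 'for i, machine_results in enumerate(results)' loop of calculate_Cmax, state (Cmax, last_machine)
def cmaxLoop : List (List (Int × Int × Int)) → Nat → Int × Int → Int × Int
  | [], _, st => st
  | m :: rest, i, st =>
    cmaxLoop rest (i + 1)
      (match m.getLast? with
       | some op =>
         let endTime := op.2.2 + op.2.1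
         if endTime > st.1 then (endTime, (i : Int) + 1) else st
       | none => st)

def calculate_Cmax (results : List (List (Int × Int × Int))) : Int × Int :=
  cmaxLoop results 0 (0, -1)

def calculate_standby_times (results : List (List (Int × Int × Int))) : List Int :=
  let Cmax := (calculate_Cmax results).1
  -- total_wait_times starts as zeros and each index i is assigned exactly once: a map over results
  results.map (fun m =>
    match m with
    | [] => Cmax
    | op0 :: _ =>
      let last := m.getLastD (0, 0, 0)
      let w := (List.range (m.length - 1)).foldl
        (fun acc j =>
          acc + (m.getD (j + 1) (0, 0, 0)).2.2
              - ((m.getD j (0, 0, 0)).2.2 + (m.getD j (0, 0, 0)).2.1))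
        op0.2.2
      w + (Cmax - (last.2.2 + last.2.1)))

-- ===== PORT B =====
def calculate_standby_times_alt (results : List (List (Int × Int × Int))) : List Int :=
  let Cmax := ((0 : Int) :: (results.filterMap List.getLast?).map (fun op => op.2.2 + op.2.1)).foldl max 0
  results.map (fun m => Cmax - (m.map (fun op => op.2.1)).sum)

-- ===== PRECONDITION & SPEC =====
def Spec_calculate_standby_times (results : List (List (Int × Int × Int))) (out : List Int) : Prop := out = calculate_standby_times_alt results
instance (results : List (List (Int × Int × Int))) (out : List Int) : Decidable (Spec_calculate_standby_times results out) := by unfold Spec_calculate_standby_times; infer_instance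

-- ===== CLAIM (what is proved, stated in full; the proofs are below) =====
def Claim_equal_calculate_standby_times : Prop := ∀ (results : List (List (Int × Int × Int))), Dom_calculate_standby_times results → Spec_calculate_standby_times results (calculate_standby_times results)

-- ===== LEMMAS AND PROOFS =====

-- A's Cmax accumulator, first component, is a running max over the end times
lemma cmaxLoop_fst (l : List (List (Int × Int × Int))) :
    ∀ (i : Nat) (st : Int × Int),
      (cmaxLoop l i st).1 =
        ((l.filterMap List.getLast?).map (fun op => op.2.2 + op.2.1)).foldl max st.1 := by
  induction l with
  | nil => intro i st; simp [cmaxLoop]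
  | cons m rest ih =>
    intro i st
    cases h : m.getLast? with
    | none => simp [cmaxLoop, h, ih]
    | some op =>
      simp only [cmaxLoop, h, ih, List.filterMap_cons, List.map_cons, List.foldl_cons]
      congr 1
      by_cases hgt : op.2.2 + op.2.1 > st.1 <;> simp [hgt] <;> omega

-- telescoping of the inner gap loop
lemma tele (m : List (Int × Int × Int)) :
    ∀ (k : Nat),
      (List.range k).foldl
        (fun acc j =>
          acc + (m.getD (j + 1) (0, 0, 0)).2.2
              - ((m.getD j (0, 0, 0)).2.2 + (m.getD j (0, 0, 0)).2.1))
        (m.getD 0 (0, 0, 0)).2.2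
      = (m.getD k (0, 0, 0)).2.2
        - ((List.range k).map (fun j => (m.getD j (0, 0, 0)).2.1)).sum := by
  intro k
  induction k with
  | zero => simp
  | succ n ih =>
    rw [List.range_succ, List.foldl_append, List.foldl_cons, List.foldl_nil, ih,
      List.map_append, List.sum_append]
    simp
    ring

-- summing a function of getD over range length = summing over the list
lemma sum_range_getD (f : (Int × Int × Int) → Int) :
    ∀ (m : List (Int × Int × Int)),
      ((List.range m.length).map (fun j => f (m.getD j (0, 0, 0)))).sum
        = (m.map f).sum := by
  intro m
  induction m with
  | nil => simp
  | cons a t ih =>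
    simp only [List.length_cons, List.range_succ_eq_map, List.map_cons, List.map_map,
      List.sum_cons]
    simp only [Function.comp_def, List.getD_cons_zero, List.getD_cons_succ]
    rw [show ((List.range t.length).map fun j => f (t.getD j (0, 0, 0))).sum = (t.map f).sum from ih]

lemma getD_last (m : List (Int × Int × Int)) (h : m ≠ []) :
    m.getD (m.length - 1) (0, 0, 0) = m.getLastD (0, 0, 0) := by
  rw [List.getLastD_eq_getLast?, List.getLast?_eq_getElem?]
  cases m with
  | nil => simp at h
  | cons a t =>
    simp [List.getD_eq_getElem?_getD]

-- ===== VERDICT (by name: the statement is the Claim_ definition above) =====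
theorem calculate_standby_times_spec : Claim_equal_calculate_standby_times := by
  intro results _
  unfold Spec_calculate_standby_times calculate_standby_times calculate_standby_times_alt
    calculate_Cmax
  simp only [List.foldl_cons]
  have hC := cmaxLoop_fst results 0 ((0 : Int), (-1 : Int))
  simp only [hC]
  apply List.map_congr_left
  intro m _
  cases m with
  | nil => simp
  | cons op0 t =>
    simp only [max_self]
    have h1 := tele (op0 :: t) ((op0 :: t).length - 1)
    simp only [List.getD_cons_zero] at h1
    rw [h1, getD_last (op0 :: t) (by simp)]
    have h2 := sum_range_getD (fun op => op.2.1) (op0 :: t)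
    -- split sum over range length into range (length-1) plus the last element
    have hlen : (op0 :: t).length = ((op0 :: t).length - 1) + 1 := by simp
    have h3 : ((List.range (op0 :: t).length).map
        (fun j => ((op0 :: t).getD j (0,0,0)).2.1)).sum
        = ((List.range ((op0 :: t).length - 1)).map
            (fun j => ((op0 :: t).getD j (0,0,0)).2.1)).sum
          + ((op0 :: t).getD ((op0 :: t).length - 1) (0,0,0)).2.1 := by
      conv_lhs => rw [hlen]
      simp [List.range_succ]
    rw [h2] at h3
    rw [getD_last (op0 :: t) (by simp)] at h3
    omega
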